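-- pv_equiv track=rewrite | github.com/Hariyy/Text-Generative-AI | data_correction.py | func_remove_non_alpha_num
-- ===== SOURCE A (Python) =====
-- def func_remove_non_alpha_num(text, start, end):
--     new_start = start
--     new_end = end
--
--     for index in range(start, end):
--         if text[index].isalnum():
--             new_start = index
--             break
--
--     for index in range(end-1, start-1, -1):
--         if text[index].isalnum():
--             new_end = index
--             break
--
--     return new_start, new_end+1
-- ===== SOURCE B (Python) =====
-- def func_remove_non_alpha_num(text, start, end):
--     # Single forward pass keeping first/last alnum positions
--     # (replaces A's separate forward and backward scans).
--     new_start = start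
--     new_end = end
--     seen = False
--     for index in range(start, end):
--         if text[index].isalnum():
--             if not seen:
--                 new_start = index
--                 seen = True
--             new_end = index
--     return new_start, new_end + 1
-- ===== Notes on version B (the rewrite author's own statement) =====
-- stated objective: alternative
-- what changed: Replaces A's two scans (a forward scan for the first alnum and a separate backward scan for the last) with a single forward pass that maintains first/last alnum state.
import Mathlib
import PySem

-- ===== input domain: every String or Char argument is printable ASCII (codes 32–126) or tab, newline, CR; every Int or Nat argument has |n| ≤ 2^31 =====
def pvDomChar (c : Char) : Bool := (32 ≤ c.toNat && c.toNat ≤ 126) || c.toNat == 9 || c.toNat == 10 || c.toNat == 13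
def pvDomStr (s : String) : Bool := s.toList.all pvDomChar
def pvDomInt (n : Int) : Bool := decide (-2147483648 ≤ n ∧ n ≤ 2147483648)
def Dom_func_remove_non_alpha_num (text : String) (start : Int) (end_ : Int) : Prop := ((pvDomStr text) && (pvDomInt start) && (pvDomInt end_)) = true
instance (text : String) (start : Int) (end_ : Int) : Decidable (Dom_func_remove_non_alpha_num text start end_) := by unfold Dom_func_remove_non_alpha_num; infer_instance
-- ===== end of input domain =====

-- B replaces A's forward + backward scans by one forward pass keeping first/last alnum state (objective: alternative).

-- ===== PORT A =====
-- text[i].isalnum(); none (IndexError) is excluded by Pre_, read as false here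
def pvAlnumAt (cs : List Char) (i : Int) : Bool :=
  match PySem.List.pyGet? cs i with
  | some c => PySem.Chars.isalnum c
  | none => false

-- 'for index in range(...): if text[index].isalnum(): acc = index; break'
def pvFindBreak (cs : List Char) : List Int → Int → Int
  | [], acc => acc
  | i :: rest, acc => if pvAlnumAt cs i then i else pvFindBreak cs rest acc

def func_remove_non_alpha_num (text : String) (start : Int) (end_ : Int) : Int × Int :=
  let cs := text.toList
  let new_start := pvFindBreak cs (PySem.List.pyRange start end_ 1) start
  let new_end := pvFindBreak cs (PySem.List.pyRange (end_ - 1) (start - 1) (-1)) end_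
  (new_start, new_end + 1)

-- ===== PORT B =====
def func_remove_non_alpha_num_alt (text : String) (start : Int) (end_ : Int) : Int × Int :=
  let cs := text.toList
  let st := (PySem.List.pyRange start end_ 1).foldl
    (fun (s : Int × Int × Bool) i =>
      if pvAlnumAt cs i then
        (if s.2.2 then s.1 else i, i, true)
      else s)
    (start, end_, false)
  (st.1, st.2.1 + 1)

-- ===== PRECONDITION & SPEC =====
-- exactly the inputs where Python A returns (outside them A's text[index] raises IndexError)
def Pre_func_remove_non_alpha_num (text : String) (start : Int) (end_ : Int) : Prop :=
  end_ ≤ start ∨ (-(text.length : Int) ≤ start ∧ end_ ≤ (text.length : Int))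
instance (text : String) (start : Int) (end_ : Int) : Decidable (Pre_func_remove_non_alpha_num text start end_) := by unfold Pre_func_remove_non_alpha_num; infer_instance

def pvWitness_func_remove_non_alpha_num : String × Int × Int := ("  ab! ", 0, 6)

def Spec_func_remove_non_alpha_num (text : String) (start : Int) (end_ : Int) (out : Int × Int) : Prop := out = func_remove_non_alpha_num_alt text start end_
instance (text : String) (start : Int) (end_ : Int) (out : Int × Int) : Decidable (Spec_func_remove_non_alpha_num text start end_ out) := by unfold Spec_func_remove_non_alpha_num; infer_instance

-- ===== CLAIM (what is proved, stated in full; the proofs are below) =====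
def Claim_equal_func_remove_non_alpha_num : Prop := ∀ (text : String) (start : Int) (end_ : Int), Dom_func_remove_non_alpha_num text start end_ → Pre_func_remove_non_alpha_num text start end_ → Spec_func_remove_non_alpha_num text start end_ (func_remove_non_alpha_num text start end_)

-- ===== LEMMAS AND PROOFS =====

-- A's break-loop is find-first with a default
theorem pvFindBreak_eq_find? (cs : List Char) (l : List Int) (acc : Int) :
    pvFindBreak cs l acc = ((l.find? (pvAlnumAt cs)).getD acc) := by
  induction l with
  | nil => rfl
  | cons i rest ih =>
      by_cases h : pvAlnumAt cs i = true
      · simp [pvFindBreak, List.find?, h]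
      · simp only [Bool.not_eq_true] at h
        simp [pvFindBreak, List.find?, h, ih]

-- B's fold maintains (first alnum else ns, last alnum else ne, any alnum)
theorem pvFold_char (cs : List Char) (l : List Int) (ns ne : Int) (seen : Bool) :
    l.foldl
      (fun (s : Int × Int × Bool) i =>
        if pvAlnumAt cs i then
          (if s.2.2 then s.1 else i, i, true)
        else s)
      (ns, ne, seen)
    = (if seen then ns else (l.find? (pvAlnumAt cs)).getD ns,
       ((l.reverse.find? (pvAlnumAt cs)).getD ne),
       seen || l.any (pvAlnumAt cs)) := by
  induction l generalizing ns ne seen with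
  | nil => simp
  | cons i rest ih =>
      by_cases h : pvAlnumAt cs i = true
      · simp only [List.foldl_cons, h, if_pos]
        rw [ih]
        cases seen <;> cases hrev : rest.reverse.find? (pvAlnumAt cs) <;>
          simp [List.find?, h, List.find?_append, hrev, Option.or]
      · simp only [Bool.not_eq_true] at h
        simp only [List.foldl_cons, h, Bool.false_eq_true, if_false]
        rw [ih]
        cases hrev : rest.reverse.find? (pvAlnumAt cs) <;>
          simp [List.find?, h, List.find?_append, hrev, Option.or]

-- ===== VERDICT (by name: the statement is the Claim_ definition above) =====
theorem func_remove_non_alpha_num_spec : Claim_equal_func_remove_non_alpha_num := by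
  intro text start end_ _ _
  unfold Spec_func_remove_non_alpha_num func_remove_non_alpha_num func_remove_non_alpha_num_alt
  have hrev : PySem.List.pyRange (end_ - 1) (start - 1) (-1)
      = (PySem.List.pyRange start end_ 1).reverse := by
    rw [PySem.List.pyRange_neg_one_eq_reverse]
    norm_num
  simp [hrev, pvFold_char, pvFindBreak_eq_find?]
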